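-- pv_equiv track=rewrite | github.com/trichlol/Projects | Python-main/funcaoMatriz.py | gerarMatriz
-- ===== SOURCE A (Python) =====
-- def gerarMatriz(dim):
--     impar = 1
--     matriz = [0] * dim
--
--     for l in range(dim):
--         matriz[l] = [0] * dim
--
--         for c in range(dim):
--             matriz[l][c] = impar
--             impar = impar + 2
--
--     return matriz
-- ===== SOURCE B (Python) =====
-- def gerarMatriz(dim):
--     # Row l holds consecutive odd numbers starting at its closed-form first
--     # value; each row is produced directly as an arithmetic range, with no
--     # counter threaded between iterations.
--     return [list(range(2 * l * dim + 1, 2 * (l + 1) * dim + 1, 2))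
--             for l in range(dim)]
-- ===== Notes on version B (the rewrite author's own statement) =====
-- stated objective: alternative
-- what changed: Eliminates the mutable odd-number counter threaded through A's nested loops: each row is produced directly as an arithmetic range object whose closed-form start and step are computed from the row index, so no per-cell assignment or state survives between iterations.
import Mathlib
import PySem

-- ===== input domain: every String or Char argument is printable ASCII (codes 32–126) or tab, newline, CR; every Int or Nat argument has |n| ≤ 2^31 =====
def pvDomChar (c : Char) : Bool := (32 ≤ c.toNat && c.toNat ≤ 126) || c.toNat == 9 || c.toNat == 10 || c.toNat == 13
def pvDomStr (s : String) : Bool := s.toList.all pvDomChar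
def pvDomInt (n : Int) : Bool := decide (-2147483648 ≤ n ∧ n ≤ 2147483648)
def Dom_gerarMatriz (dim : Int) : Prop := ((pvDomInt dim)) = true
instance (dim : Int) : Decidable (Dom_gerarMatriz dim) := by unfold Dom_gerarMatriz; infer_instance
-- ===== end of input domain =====

-- B replaces A's running odd-number counter with rows generated directly as
-- arithmetic ranges from a closed-form start (alternative, stateless decomposition).


-- ===== PORT A =====
-- Python initialises matriz as [0]*dim (int placeholders, each overwritten before
-- use); the typed port uses [] as the placeholder row — every slot is overwritten
-- by the loop exactly as in Python, so the value is the same.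
def gerarMatriz (dim : Int) : List (List Int) :=
  let impar : Int := 1
  let matriz : List (List Int) := List.replicate dim.toNat []
  let st := (PySem.List.pyRange 0 dim 1).foldl
    (fun (st : List (List Int) × Int) l =>
      let row : List Int := List.replicate dim.toNat 0
      let inner := (PySem.List.pyRange 0 dim 1).foldl
        (fun (st2 : List Int × Int) c => (st2.1.set c.toNat st2.2, st2.2 + 2))
        (row, st.2)
      (st.1.set l.toNat inner.1, inner.2))
    (matriz, impar)
  st.1

-- ===== PORT B =====
def gerarMatriz_alt (dim : Int) : List (List Int) :=
  (PySem.List.pyRange 0 dim 1).map (fun l =>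
    PySem.List.pyRange (2 * l * dim + 1) (2 * (l + 1) * dim + 1) 2)

-- ===== PRECONDITION & SPEC =====
def Spec_gerarMatriz (dim : Int) (out : List (List Int)) : Prop := out = gerarMatriz_alt dim
instance (dim : Int) (out : List (List Int)) : Decidable (Spec_gerarMatriz dim out) := by unfold Spec_gerarMatriz; infer_instance

-- ===== CLAIM (what is proved, stated in full; the proofs are below) =====
def Claim_equal_gerarMatriz : Prop := ∀ (dim : Int), Dom_gerarMatriz dim → Spec_gerarMatriz dim (gerarMatriz dim)

-- ===== LEMMAS AND PROOFS =====

-- Generic "fill loop": setting slot k of a pre-allocated list to f(counter) while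
-- updating the counter by u, over indices 0..m-1, yields the mapped prefix plus
-- the untouched padding, with the counter iterated m times.
theorem pv_fold_fill {α : Type} (f : Int → α) (u : Int → Int) (pad : α)
    (n : Nat) : ∀ (m : Nat), m ≤ n → ∀ (imp : Int),
    (List.range m).foldl (fun (st : List α × Int) k => (st.1.set k (f st.2), u st.2))
      (List.replicate n pad, imp)
    = ((List.range m).map (fun k => f (u^[k] imp)) ++ List.replicate (n - m) pad, u^[m] imp) := by
  intro m
  induction m with
  | zero => intro _ imp; simp
  | succ m ih =>
    intro hm imp
    rw [List.range_succ, List.foldl_append, ih (Nat.le_of_succ_le hm) imp]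
    simp only [List.foldl_cons, List.foldl_nil, Prod.mk.injEq]
    constructor
    · have hlen : ((List.range m).map (fun k => f (u^[k] imp))).length = m := by simp
      rw [List.set_append_right _ _ (by omega)]
      have hrep : n - m = (n - (m + 1)) + 1 := by omega
      rw [hlen, Nat.sub_self, hrep, List.replicate_succ, List.set_cons_zero]
      simp [List.map_append]
    · simp [Function.iterate_succ_apply']

theorem pv_iter_add (a : Int) : ∀ (k : Nat) (imp : Int), (fun x => x + a)^[k] imp = imp + a * k := by
  intro k
  induction k with
  | zero => simp
  | succ k ih =>
    intro imp
    rw [Function.iterate_succ_apply', ih]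
    push_cast; ring

-- the inner loop over one row
theorem pv_inner (n : Nat) (imp : Int) :
    (List.range n).foldl (fun (st2 : List Int × Int) c => (st2.1.set c st2.2, st2.2 + 2))
      (List.replicate n 0, imp)
    = ((List.range n).map (fun c : Nat => imp + 2 * (c : Int)), imp + 2 * (n : Int)) := by
  rw [pv_fold_fill (fun x => x) (fun x => x + 2) 0 n n le_rfl imp]
  simp only [Nat.sub_self, List.replicate_zero, List.append_nil, pv_iter_add]

-- the whole computation, phrased over Nat indices
theorem pv_main (n : Nat) :
    ((List.range n).foldl
      (fun (st : List (List Int) × Int) l =>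
        let inner := (List.range n).foldl
          (fun (st2 : List Int × Int) c => (st2.1.set c st2.2, st2.2 + 2))
          (List.replicate n 0, st.2)
        (st.1.set l inner.1, inner.2))
      (List.replicate n [], (1 : Int))).1
    = (List.range n).map (fun l : Nat =>
        (List.range n).map (fun c : Nat => 2 * ((l : Int) * (n : Int) + (c : Int)) + 1)) := by
  have hcongr : (List.range n).foldl
      (fun (st : List (List Int) × Int) l =>
        let inner := (List.range n).foldl
          (fun (st2 : List Int × Int) c => (st2.1.set c st2.2, st2.2 + 2))
          (List.replicate n 0, st.2)
        (st.1.set l inner.1, inner.2))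
      (List.replicate n [], (1 : Int))
      = (List.range n).foldl
      (fun (st : List (List Int) × Int) l =>
        (st.1.set l ((List.range n).map (fun c : Nat => st.2 + 2 * (c : Int))), st.2 + 2 * (n : Int)))
      (List.replicate n [], (1 : Int)) := by
    apply PySem.List.foldl_congr_mem
    intro st l _
    rw [pv_inner n st.2]
  rw [hcongr,
    pv_fold_fill (fun imp => (List.range n).map (fun c : Nat => imp + 2 * (c : Int)))
      (fun x => x + 2 * (n : Int)) [] n n le_rfl 1]
  simp only [Nat.sub_self, List.replicate_zero, List.append_nil]
  apply List.map_congr_left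
  intro l _
  apply List.map_congr_left
  intro c _
  rw [pv_iter_add]
  ring

-- ===== VERDICT (by name: the statement is the Claim_ definition above) =====
theorem gerarMatriz_spec : Claim_equal_gerarMatriz := by
  intro dim _
  unfold Spec_gerarMatriz gerarMatriz gerarMatriz_alt
  by_cases hd : dim ≤ 0
  · rw [PySem.List.pyRange_one_eq_nil hd]
    simp [Int.toNat_of_nonpos hd]
  · have hd' : 0 < dim := by omega
    rw [PySem.List.pyRange_one]
    have hn : ((dim : Int) - 0).toNat = dim.toNat := by omega
    have hdim : (dim.toNat : Int) = dim := Int.toNat_of_nonneg (le_of_lt hd')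
    rw [hn, ← hdim]
    set n := dim.toNat with hdn
    have hn0 : 0 < (n : Int) := by omega
    simp only [List.foldl_map, List.map_map, zero_add, Int.toNat_natCast, Function.comp_def]
    rw [pv_main n]
    apply List.map_congr_left
    intro l _
    rw [PySem.List.pyRange_of_pos _ _ (by norm_num : (0:Int) < 2)]
    have hlt : 2 * (l : Int) * (n : Int) + 1 < 2 * ((l : Int) + 1) * (n : Int) + 1 := by
      nlinarith
    rw [if_pos hlt]
    have hcnt : 2 * ((l : Int) + 1) * (n : Int) + 1 - (2 * (l : Int) * (n : Int) + 1) + 2 - 1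
        = 2 * (n : Int) + 1 := by ring
    rw [hcnt]
    have hdiv : (2 * (n : Int) + 1) / 2 = (n : Int) := by omega
    rw [hdiv, Int.toNat_natCast]
    apply List.map_congr_left
    intro c _
    ring
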